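-- pv_equiv track=rewrite | github.com/jfkey/iPCL-R | experiments/drc_analysis/collect_drc.py | _get_legend_order
-- ===== SOURCE A (Python) =====
-- from typing import List, Optional, Tuple
--
-- def _get_legend_order(labels: List[str]) -> List[int]:
--     """Get legend order for proper grouping."""
--     legend_order = []
--     for meta_type in ["GT", "PRED", "POST"]:
--         for label_suffix in ["", " (ECO)"]:
--             target_label = f"{meta_type}{label_suffix}"
--             for i, label in enumerate(labels):
--                 if label == target_label:
--                     legend_order.append(i)
--     return legend_order
-- ===== SOURCE B (Python) =====
-- def _get_legend_order(labels):
--     """Get legend order for proper grouping."""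
--     priority = {"GT": 0, "GT (ECO)": 1, "PRED": 2, "PRED (ECO)": 3,
--                 "POST": 4, "POST (ECO)": 5}
--     keyed = [(priority[label], i) for i, label in enumerate(labels)
--              if label in priority]
--     keyed.sort(key=lambda t: t[0])  # stable: ties stay in ascending-index order
--     return [i for _, i in keyed]
-- ===== Notes on version B (the rewrite author's own statement) =====
-- stated objective: alternative
-- what changed: Instead of six scans of the labels list (one per target label), B tags each relevant index with its label's priority rank in a single pass and stable-sorts the (rank, index) pairs, reading the result off the sorted list.
import Mathlib
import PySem

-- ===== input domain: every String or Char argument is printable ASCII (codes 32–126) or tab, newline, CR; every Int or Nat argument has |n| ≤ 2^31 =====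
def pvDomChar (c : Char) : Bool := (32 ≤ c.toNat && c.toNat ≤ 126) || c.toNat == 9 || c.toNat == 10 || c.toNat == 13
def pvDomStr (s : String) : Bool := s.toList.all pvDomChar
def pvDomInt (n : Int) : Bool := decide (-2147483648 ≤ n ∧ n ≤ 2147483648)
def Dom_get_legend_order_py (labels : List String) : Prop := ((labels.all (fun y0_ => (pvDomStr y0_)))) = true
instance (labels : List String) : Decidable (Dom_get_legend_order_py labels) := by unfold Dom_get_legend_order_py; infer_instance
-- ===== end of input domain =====

-- B replaces A's six scans of the labels list by one tagging pass (index ↦ its label's priority rank)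
-- followed by a stable sort of the (rank, index) pairs (objective: alternative algorithm, similar cost).

-- ===== PORT A =====
-- literal port: three nested loops, innermost scans enumerate(labels) appending matching indices
def get_legend_order_py (labels : List String) : List Int :=
  ["GT", "PRED", "POST"].foldl (fun acc meta_type =>
    ["", " (ECO)"].foldl (fun acc label_suffix =>
      let target_label := meta_type ++ label_suffix
      (PySem.List.enumerate labels).foldl (fun acc p =>
        if p.2 == target_label then acc ++ [p.1] else acc) acc) acc) []

-- ===== PORT B =====
-- literal port of Source B: the priority dict, the guarded comprehension, the stable sort by rank, the read-off
def pvPriority : PySem.Dict String Int :=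
  PySem.Dict.ofList [("GT", 0), ("GT (ECO)", 1), ("PRED", 2), ("PRED (ECO)", 3), ("POST", 4), ("POST (ECO)", 5)]

def get_legend_order_py_alt (labels : List String) : List Int :=
  let keyed := ((PySem.List.enumerate labels).filter
      (fun p => (pvPriority.get? p.2).isSome)).map
      (fun p => ((pvPriority.get? p.2).getD 0, p.1))
  (PySem.List.sorted keyed (fun t => t.1) false).map (fun t => t.2)

-- ===== PRECONDITION & SPEC =====
def Spec_get_legend_order_py (labels : List String) (out : List Int) : Prop := out = get_legend_order_py_alt labels
instance (labels : List String) (out : List Int) : Decidable (Spec_get_legend_order_py labels out) := by unfold Spec_get_legend_order_py; infer_instance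

-- ===== CLAIM (what is proved, stated in full; the proofs are below) =====
def Claim_equal_get_legend_order_py : Prop := ∀ (labels : List String), Dom_get_legend_order_py labels → Spec_get_legend_order_py labels (get_legend_order_py labels)

-- ===== LEMMAS AND PROOFS =====

theorem pv_insertBy_forall_before {α : Type} (bef : α → α → Bool) (x : α) (ys : List α)
    (h : ∀ y ∈ ys, bef x y = true) :
    PySem.List.insertBy bef x ys = x :: ys := by
  cases ys with
  | nil => rfl
  | cons y t => simp [PySem.List.insertBy, h y (by simp)]

theorem pv_insertBy_append_skip {α : Type} (bef : α → α → Bool) (x : α) (as bs : List α)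
    (h : ∀ a ∈ as, bef x a = false) :
    PySem.List.insertBy bef x (as ++ bs) = as ++ PySem.List.insertBy bef x bs := by
  induction as with
  | nil => rfl
  | cons a t ih =>
    have ha : bef x a = false := h a (by simp)
    have hstep : PySem.List.insertBy bef x (a :: (t ++ bs))
        = a :: PySem.List.insertBy bef x (t ++ bs) := by
      simp [PySem.List.insertBy, ha]
    simp only [List.cons_append]
    rw [hstep, ih (fun z hz => h z (by simp [hz]))]

theorem pv_flatMap_congr {α β : Type} (l : List α) (f g : α → List β)
    (h : ∀ a ∈ l, f a = g a) : l.flatMap f = l.flatMap g := by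
  induction l with
  | nil => rfl
  | cons a t ih => simp [List.flatMap_cons, h a (by simp), ih (fun z hz => h z (by simp [hz]))]

theorem pv_insert_groups {α : Type} (key : α → Int) (x : α) :
    ∀ (rs : List Int), rs.Pairwise (· < ·) → key x ∈ rs → ∀ (xs : List α),
    PySem.List.insertBy (fun a b => decide (key a < key b)) x
        (rs.flatMap (fun r => xs.filter (fun y => key y == r)))
      = rs.flatMap (fun r => (xs ++ [x]).filter (fun y => key y == r)) := by
  intro rs
  induction rs with
  | nil => intro _ hx; exact absurd hx (by simp)
  | cons r rs' ih =>
    intro hp hx xs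
    have hlt : ∀ r' ∈ rs', r < r' := (List.pairwise_cons.mp hp).1
    have hp' : rs'.Pairwise (· < ·) := (List.pairwise_cons.mp hp).2
    have hkeyg : ∀ a ∈ xs.filter (fun y => key y == r), key a = r := by
      intro a ha; exact beq_iff_eq.mp (List.mem_filter.mp ha).2
    by_cases hxr : key x = r
    · -- x belongs to the head group: skip over it, then prepend before all later groups
      have hnot : ∀ a ∈ xs.filter (fun y => key y == r),
          (fun a b => decide (key a < key b)) x a = false := by
        intro a ha; simp [hkeyg a ha, hxr]
      have hall : ∀ z ∈ rs'.flatMap (fun r' => xs.filter (fun y => key y == r')),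
          (fun a b => decide (key a < key b)) x z = true := by
        intro z hz
        obtain ⟨r', hr', hzf⟩ := List.mem_flatMap.mp hz
        have : key z = r' := beq_iff_eq.mp (List.mem_filter.mp hzf).2
        simp [this, hxr]
        exact hlt r' hr'
      have hrest : rs'.flatMap (fun r' => (xs ++ [x]).filter (fun y => key y == r'))
          = rs'.flatMap (fun r' => xs.filter (fun y => key y == r')) := by
        apply pv_flatMap_congr
        intro r' hr'
        have : (key x == r') = false := by
          simp [hxr]; exact Int.ne_of_lt (hlt r' hr')
        simp [List.filter_append, this]
      simp only [List.flatMap_cons]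
      rw [pv_insertBy_append_skip _ _ _ _ hnot, pv_insertBy_forall_before _ _ _ hall, hrest]
      have hhead : (xs ++ [x]).filter (fun y => key y == r)
          = xs.filter (fun y => key y == r) ++ [x] := by
        simp [List.filter_append, hxr]
      rw [hhead]
      simp
    · -- x belongs to a later group
      have hx' : key x ∈ rs' := by
        rcases List.mem_cons.mp hx with h | h
        · exact absurd h hxr
        · exact h
      have hgt : r < key x := hlt _ hx'
      have hnot : ∀ a ∈ xs.filter (fun y => key y == r),
          (fun a b => decide (key a < key b)) x a = false := by
        intro a ha; simp [hkeyg a ha]; omega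
      have hhead : (xs ++ [x]).filter (fun y => key y == r)
          = xs.filter (fun y => key y == r) := by
        have : (key x == r) = false := by simp; omega
        simp [List.filter_append, this]
      simp only [List.flatMap_cons]
      rw [pv_insertBy_append_skip _ _ _ _ hnot, ih hp' hx' xs, hhead]

theorem pv_sorted_groups {α : Type} (key : α → Int) (rs : List Int) (hrs : rs.Pairwise (· < ·)) :
    ∀ (xs : List α), (∀ x ∈ xs, key x ∈ rs) →
    PySem.List.sorted xs key false = rs.flatMap (fun r => xs.filter (fun y => key y == r)) := by
  intro xs
  induction xs using List.reverseRecOn with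
  | nil => simp [PySem.List.sorted_eq_foldl_insertBy]
  | append_singleton xs x ih =>
    intro hmem
    have h1 : PySem.List.sorted (xs ++ [x]) key false
        = PySem.List.insertBy (fun a b => decide (key a < key b)) x (PySem.List.sorted xs key false) := by
      rw [PySem.List.sorted_eq_foldl_insertBy, PySem.List.sorted_eq_foldl_insertBy, List.foldl_append]
      rfl
    rw [h1, ih (fun z hz => hmem z (by simp [hz])),
        pv_insert_groups key x rs hrs (hmem x (by simp))]

-- the literal dict as nested ifs
theorem pv_lookup (s : String) : pvPriority.get? s =
    if s == "GT" then some 0 else if s == "GT (ECO)" then some 1 else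
    if s == "PRED" then some 2 else if s == "PRED (ECO)" then some 3 else
    if s == "POST" then some 4 else if s == "POST (ECO)" then some 5 else none := by
  have : pvPriority = PySem.Dict.mk [("GT", 0), ("GT (ECO)", 1), ("PRED", 2), ("PRED (ECO)", 3), ("POST", 4), ("POST (ECO)", 5)] := by decide
  rw [this]
  simp only [PySem.Dict.get?_mk_cons]
  by_cases h1 : ("GT" : String) == s <;>
  by_cases h2 : ("GT (ECO)" : String) == s <;>
  by_cases h3 : ("PRED" : String) == s <;>
  by_cases h4 : ("PRED (ECO)" : String) == s <;>
  by_cases h5 : ("POST" : String) == s <;>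
  by_cases h6 : ("POST (ECO)" : String) == s <;>
    simp_all [BEq.comm, PySem.Dict.get?]

theorem pv_keyed_mem (labels : List String) (q : Int × Int)
    (hq : q ∈ ((PySem.List.enumerate labels).filter
        (fun p => (pvPriority.get? p.2).isSome)).map
        (fun p => ((pvPriority.get? p.2).getD 0, p.1))) :
    q.1 ∈ ([0, 1, 2, 3, 4, 5] : List Int) := by
  obtain ⟨p, hp, rfl⟩ := List.mem_map.mp hq
  have hs : (pvPriority.get? p.2).isSome := by
    have := (List.mem_filter.mp hp).2; simpa using this
  rw [pv_lookup p.2] at hs ⊢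
  split_ifs at hs ⊢ <;> simp_all

-- the r-th group of B's sorted pairs is exactly A's scan for the r-th target label
theorem pv_group_eq (labels : List String) (t : String) (r : Int)
    (h : ∀ s : String, ((pvPriority.get? s).isSome && ((pvPriority.get? s).getD 0 == r)) = (s == t)) :
    ((((PySem.List.enumerate labels).filter (fun p => (pvPriority.get? p.2).isSome)).map
        (fun p => ((pvPriority.get? p.2).getD 0, p.1))).filter (fun y => y.1 == r)).map (fun t => t.2)
    = ((PySem.List.enumerate labels).filter (fun p => p.2 == t)).map (fun p => p.1) := by
  rw [List.filter_map, List.map_map, List.filter_filter]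
  have hc := List.filter_congr (l := PySem.List.enumerate labels)
    (p := fun a => ((fun y => y.1 == r) ∘ fun p => ((pvPriority.get? p.2).getD 0, p.1)) a
        && (pvPriority.get? a.2).isSome)
    (q := fun p => p.2 == t)
    (fun p _ => by simpa [Bool.and_comm] using h p.2)
  rw [hc]
  rfl

-- ===== VERDICT (by name: the statement is the Claim_ definition above) =====
theorem get_legend_order_py_spec : Claim_equal_get_legend_order_py := by
  intro labels _
  unfold Spec_get_legend_order_py get_legend_order_py get_legend_order_py_alt
  simp only [List.foldl_cons, List.foldl_nil, PySem.List.foldl_append_if,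
    show ("GT" ++ "" : String) = "GT" from rfl,
    show ("GT" ++ " (ECO)" : String) = "GT (ECO)" from rfl,
    show ("PRED" ++ "" : String) = "PRED" from rfl,
    show ("PRED" ++ " (ECO)" : String) = "PRED (ECO)" from rfl,
    show ("POST" ++ "" : String) = "POST" from rfl,
    show ("POST" ++ " (ECO)" : String) = "POST (ECO)" from rfl]
  rw [pv_sorted_groups (α := Int × Int) (fun t => t.1) [0, 1, 2, 3, 4, 5] (by decide) _
        (pv_keyed_mem labels)]
  rw [List.map_flatMap]
  simp only [List.flatMap_cons, List.flatMap_nil, List.append_nil]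
  rw [pv_group_eq labels "GT" 0 (by intro s; rw [pv_lookup s]; split_ifs <;> simp_all),
      pv_group_eq labels "GT (ECO)" 1 (by intro s; rw [pv_lookup s]; split_ifs <;> simp_all),
      pv_group_eq labels "PRED" 2 (by intro s; rw [pv_lookup s]; split_ifs <;> simp_all),
      pv_group_eq labels "PRED (ECO)" 3 (by intro s; rw [pv_lookup s]; split_ifs <;> simp_all),
      pv_group_eq labels "POST" 4 (by intro s; rw [pv_lookup s]; split_ifs <;> simp_all),
      pv_group_eq labels "POST (ECO)" 5 (by intro s; rw [pv_lookup s]; split_ifs <;> simp_all)]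
  simp
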